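-- pv_equiv track=rewrite | github.com/123yucc/swe-demo | src/agents/patch_generator_agent.py | _planned_files_present_in_diff
-- ===== SOURCE A (Python) =====
-- def _planned_files_present_in_diff(diff_text: str, planned_files: list[str]) -> list[str]:
--     """Return planned files that are missing from the generated diff."""
--     if not planned_files:
--         return []
--     diff_paths: set[str] = set()
--     for line in diff_text.splitlines():
--         if not line.startswith("diff --git "):
--             continue
--         parts = line.split(" b/", 1)
--         if len(parts) == 2:
--             diff_paths.add(parts[1].strip().replace("\\", "/"))
--     missing: list[str] = []
--     for path in planned_files:
--         norm = path.replace("\\", "/")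
--         if norm not in diff_paths:
--             missing.append(norm)
--     return missing
-- ===== SOURCE B (Python) =====
-- def _line_names_path(line: str, norm: str) -> bool:
--     if not line.startswith("diff --git "):
--         return False
--     parts = line.split(" b/", 1)
--     return len(parts) == 2 and parts[1].strip().replace("\\", "/") == norm
--
--
-- def _planned_files_present_in_diff(diff_text: str, planned_files: list[str]) -> list[str]:
--     """Return planned files that are missing from the generated diff."""
--     if not planned_files:
--         return []
--     lines = diff_text.splitlines()
--     return [norm
--             for norm in (p.replace("\\", "/") for p in planned_files)
--             if not any(_line_names_path(line, norm) for line in lines)]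
-- ===== Notes on version B (the rewrite author's own statement) =====
-- stated objective: alternative
-- what changed: B drops A's precomputed set of diff paths entirely: for each planned file it scans the diff lines directly with a per-line match predicate, collecting the misses in one comprehension.
import Mathlib
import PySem

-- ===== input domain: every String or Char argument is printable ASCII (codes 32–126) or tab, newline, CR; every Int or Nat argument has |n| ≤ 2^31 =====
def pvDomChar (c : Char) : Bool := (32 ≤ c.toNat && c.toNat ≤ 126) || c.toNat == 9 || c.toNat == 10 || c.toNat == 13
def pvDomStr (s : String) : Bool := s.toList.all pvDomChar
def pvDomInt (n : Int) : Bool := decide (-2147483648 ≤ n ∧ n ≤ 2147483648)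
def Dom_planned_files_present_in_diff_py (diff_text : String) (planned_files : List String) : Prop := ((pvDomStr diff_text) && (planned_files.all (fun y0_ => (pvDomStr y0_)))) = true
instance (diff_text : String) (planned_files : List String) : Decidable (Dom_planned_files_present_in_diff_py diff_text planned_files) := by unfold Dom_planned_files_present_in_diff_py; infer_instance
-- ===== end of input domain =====

-- ===== PORT A =====
-- B replaces A's precomputed set of diff paths by a direct per-planned-file scan of the diff lines (alternative decomposition; return value only).
-- one line of A's set-building loop (guard, split(" b/",1), len==2 check, strip+backslash-normalise, set.add)
def pvAddLine (s : PySem.Set String) (line : String) : PySem.Set String :=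
  if !(PySem.Str.startswith line "diff --git ") then s
  else
    match PySem.Str.splitMax? line " b/" 1 with
    | some parts =>
        if parts.length = 2 then
          -- parts[1] is in range because parts.length = 2
          PySem.Set.add s (PySem.Str.replace (PySem.Str.strip (parts.getD 1 "")) "\\" "/")
        else s
    | none => s

def planned_files_present_in_diff_py (diff_text : String) (planned_files : List String) : List String :=
  if planned_files = [] then []
  else
    let diff_paths : PySem.Set String :=
      (PySem.Str.splitlines diff_text).foldl pvAddLine PySem.Set.empty
    planned_files.foldl (fun missing path =>
      let norm := PySem.Str.replace path "\\" "/"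
      if !(PySem.Set.contains diff_paths norm) then missing ++ [norm] else missing) []

-- ===== PORT B =====
def pvLineNamesPath (line : String) (norm : String) : Bool :=
  if !(PySem.Str.startswith line "diff --git ") then false
  else
    match PySem.Str.splitMax? line " b/" 1 with
    | some parts =>
        parts.length = 2 && PySem.Str.replace (PySem.Str.strip (parts.getD 1 "")) "\\" "/" == norm
    | none => false

def planned_files_present_in_diff_py_alt (diff_text : String) (planned_files : List String) : List String :=
  if planned_files = [] then []
  else
    let lines := PySem.Str.splitlines diff_text
    (planned_files.map (fun p => PySem.Str.replace p "\\" "/")).filter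
      (fun norm => !(lines.any (fun line => pvLineNamesPath line norm)))

-- ===== PRECONDITION & SPEC =====
def Spec_planned_files_present_in_diff_py (diff_text : String) (planned_files : List String) (out : List String) : Prop := out = planned_files_present_in_diff_py_alt diff_text planned_files
instance (diff_text : String) (planned_files : List String) (out : List String) : Decidable (Spec_planned_files_present_in_diff_py diff_text planned_files out) := by unfold Spec_planned_files_present_in_diff_py; infer_instance

-- ===== CLAIM (what is proved, stated in full; the proofs are below) =====
def Claim_equal_planned_files_present_in_diff_py : Prop := ∀ (diff_text : String) (planned_files : List String), Dom_planned_files_present_in_diff_py diff_text planned_files → Spec_planned_files_present_in_diff_py diff_text planned_files (planned_files_present_in_diff_py diff_text planned_files)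

-- ===== LEMMAS AND PROOFS =====
theorem mem_pvAddLine (s : PySem.Set String) (l x : String) :
    x ∈ pvAddLine s l ↔ x ∈ s ∨ pvLineNamesPath l x := by
  unfold pvAddLine pvLineNamesPath
  cases h : PySem.Str.startswith l "diff --git " with
  | false => simp
  | true =>
    simp only [Bool.not_true, Bool.false_eq_true, if_false]
    cases hp : PySem.Str.splitMax? l " b/" 1 with
    | none => simp
    | some parts =>
      by_cases hl : parts.length = 2
      · simp only [hl, if_true, PySem.Set.mem_add, decide_true, Bool.true_and, beq_iff_eq]
        constructor
        · rintro (hx | hx)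
          · exact Or.inl hx
          · exact Or.inr hx.symm
        · rintro (hx | hx)
          · exact Or.inl hx
          · exact Or.inr hx.symm
      · simp [hl]

theorem mem_foldl_pvAddLine (lines : List String) (s : PySem.Set String) (x : String) :
    x ∈ lines.foldl pvAddLine s ↔ x ∈ s ∨ lines.any (fun l => pvLineNamesPath l x) := by
  induction lines generalizing s with
  | nil => simp
  | cons l ls ih =>
    simp only [List.foldl_cons, List.any_cons, ih, mem_pvAddLine, Bool.or_eq_true, or_assoc]

theorem contains_foldl_pvAddLine (lines : List String) (x : String) :
    PySem.Set.contains (lines.foldl pvAddLine PySem.Set.empty) x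
      = lines.any (fun l => pvLineNamesPath l x) := by
  rw [Bool.eq_iff_iff, PySem.Set.contains_iff, mem_foldl_pvAddLine]
  simp [PySem.Set.empty]

theorem filter_eq_foldl (lines : List String) (ps : List String) (acc : List String) :
    acc ++ (ps.map (fun p => PySem.Str.replace p "\\" "/")).filter
      (fun norm => !(lines.any (fun line => pvLineNamesPath line norm)))
    = ps.foldl (fun missing path =>
        let norm := PySem.Str.replace path "\\" "/"
        if !(lines.any (fun line => pvLineNamesPath line norm))
        then missing ++ [norm] else missing) acc := by
  induction ps generalizing acc with
  | nil => simp
  | cons p ps ih =>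
    simp only [List.map_cons, List.filter_cons, List.foldl_cons]
    cases hb : lines.any (fun l => pvLineNamesPath l (PySem.Str.replace p "\\" "/")) with
    | true => simpa only [hb, Bool.not_true, Bool.false_eq_true, if_false] using ih acc
    | false =>
      simpa only [hb, Bool.not_false, if_true, List.append_assoc,
        List.singleton_append] using ih (acc ++ [PySem.Str.replace p "\\" "/"])

-- ===== VERDICT (by name: the statement is the Claim_ definition above) =====
theorem planned_files_present_in_diff_py_spec : Claim_equal_planned_files_present_in_diff_py := by
  intro diff_text planned_files _
  unfold Spec_planned_files_present_in_diff_py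
  unfold planned_files_present_in_diff_py planned_files_present_in_diff_py_alt
  by_cases h : planned_files = []
  · simp [h]
  · simp only [h, if_false, contains_foldl_pvAddLine]
    rw [← filter_eq_foldl (PySem.Str.splitlines diff_text) planned_files []]
    simp
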